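-- pv_equiv track=rewrite | github.com/rebuilder945/FL_research | ast_research/python_code_5.23/newpage4/success_code/廖廷彬-3229-2024-03-26_20_34_24.py | find_unique_elements
-- ===== SOURCE A (Python) =====
-- def find_unique_elements(nums):
--     count = {}
--     for num in nums:
--         if num in count:
--             count[num] += 1
--         else:
--             count[num] = 1
--
--     unique_elements = [num for num, freq in count.items() if freq == 1]
--
--     if unique_elements:
--         return ','.join(map(str, sorted(unique_elements)))
--     else:
--         return "False"
-- ===== SOURCE B (Python) =====
-- def find_unique_elements(nums):
--     s = sorted(nums)
--     result = []
--     i = 0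
--     n = len(s)
--     while i < n:
--         j = i + 1
--         while j < n and s[j] == s[i]:
--             j += 1
--         if j == i + 1:
--             result.append(s[i])
--         i = j
--     if result:
--         return ','.join(map(str, result))
--     return "False"
-- ===== Notes on version B (the rewrite author's own statement) =====
-- stated objective: alternative
-- what changed: Replaced the dict-frequency count plus separate sort of the unique subset by sorting the whole list once and doing a single linear pass over runs of equal elements, emitting a value exactly when its run has length 1 (already in sorted order).
import Mathlib
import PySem

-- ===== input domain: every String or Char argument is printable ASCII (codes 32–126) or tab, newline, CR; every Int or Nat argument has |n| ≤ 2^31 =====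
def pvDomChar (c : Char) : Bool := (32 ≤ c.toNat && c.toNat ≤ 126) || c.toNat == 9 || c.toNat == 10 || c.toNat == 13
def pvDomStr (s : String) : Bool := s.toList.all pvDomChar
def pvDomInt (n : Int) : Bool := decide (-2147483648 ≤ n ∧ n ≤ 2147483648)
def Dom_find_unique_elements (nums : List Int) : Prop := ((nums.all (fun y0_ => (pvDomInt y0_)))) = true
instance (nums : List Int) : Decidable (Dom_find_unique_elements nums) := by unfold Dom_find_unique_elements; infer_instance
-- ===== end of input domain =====

-- B replaces A's dict-frequency count plus separate sort of the unique subset by one sort of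
-- the whole list followed by a single run-grouping pass (objective: alternative decomposition).

-- ===== PORT A =====
def find_unique_elements (nums : List Int) : String :=
  let count := nums.foldl
    (fun d num => if d.contains num then d.modify num 0 (· + 1) else d.insert num 1)
    (PySem.Dict.empty : PySem.Dict Int Int)
  let unique_elements := (count.items.filter (fun p => p.2 == 1)).map (·.1)
  if unique_elements = [] then "False"
  else PySem.Str.join "," ((PySem.List.sorted unique_elements (fun x => x)).map PySem.Int.toStr)

-- ===== PORT B =====
-- the outer while loop of Source B: take the run of elements equal to the head, keep the head iff
-- the run has length 1 (the inner 'while j < n and s[j] == s[i]' is the takeWhile)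
def pvRuns : List Int → List Int
  | [] => []
  | x :: xs =>
      if (xs.takeWhile (fun y => y == x)) = []
      then x :: pvRuns (xs.dropWhile (fun y => y == x))
      else pvRuns (xs.dropWhile (fun y => y == x))
termination_by s => s.length
decreasing_by
  all_goals exact Nat.lt_succ_of_le (List.length_dropWhile_le _ _)

def find_unique_elements_alt (nums : List Int) : String :=
  let result := pvRuns (PySem.List.sorted nums (fun x => x))
  if result = [] then "False"
  else PySem.Str.join "," (result.map PySem.Int.toStr)

-- ===== PRECONDITION & SPEC =====
def Spec_find_unique_elements (nums : List Int) (out : String) : Prop := out = find_unique_elements_alt nums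
instance (nums : List Int) (out : String) : Decidable (Spec_find_unique_elements nums out) := by unfold Spec_find_unique_elements; infer_instance

-- ===== CLAIM (what is proved, stated in full; the proofs are below) =====
def Claim_equal_find_unique_elements : Prop := ∀ (nums : List Int), Dom_find_unique_elements nums → Spec_find_unique_elements nums (find_unique_elements nums)

-- ===== LEMMAS AND PROOFS =====

-- A's counting loop is exactly Counter(nums)
theorem pvFold_eq_counter (nums : List Int) :
    nums.foldl (fun d num => if d.contains num then d.modify num 0 (· + 1) else d.insert num 1)
      (PySem.Dict.empty : PySem.Dict Int Int) = PySem.Dict.counter nums := by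
  have hstep : ∀ (d : PySem.Dict Int Int) (num : Int),
      (if d.contains num then d.modify num 0 (· + 1) else d.insert num 1)
        = d.modify num 0 (· + 1) := by
    intro d num
    by_cases h : d.contains num = true
    · simp [h]
    · simp only [Bool.not_eq_true] at h
      simp [h, PySem.Dict.modify, PySem.Dict.getD_of_not_contains d 0 h]
  simp only [hstep]
  rfl

-- A's unique_elements list, in terms of counts
theorem pvUnique_eq (nums : List Int) :
    (((PySem.Dict.counter nums).items.filter (fun p => p.2 == 1)).map (·.1))
      = (PySem.Set.ofList nums).filter (fun k => ((nums.count k : Int)) == 1) := by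
  rw [PySem.Dict.items_counter]
  rw [List.filter_map, List.map_map]
  simp [Function.comp_def]

-- dropWhile (· == x) of a sorted list contains no x
theorem pvNot_mem_dropWhile (x : Int) (xs : List Int)
    (hs : List.Pairwise (· ≤ ·) xs) (hx : ∀ y ∈ xs, x ≤ y) :
    x ∉ xs.dropWhile (fun y => y == x) := by
  intro hmem
  cases hr : xs.dropWhile (fun y => y == x) with
  | nil => simp [hr] at hmem
  | cons h t =>
    have hhead : (h == x) = false := by
      have := List.head?_dropWhile_not (fun y => y == x) xs
      rw [hr] at this; simpa using this
    have hne : h ≠ x := by simpa using hhead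
    have hsub : List.Sublist (h :: t) xs := by
      rw [← hr]; exact List.dropWhile_sublist _
    have hxh : x ≤ h := hx h (hsub.mem (by simp))
    rw [hr] at hmem
    rcases List.mem_cons.mp hmem with rfl | hmt
    · exact hne rfl
    · have hpair : List.Pairwise (· ≤ ·) (h :: t) := hs.sublist hsub
      have hhx : h ≤ x := (List.pairwise_cons.mp hpair).1 x hmt
      exact hne (le_antisymm hhx hxh)

-- the run-grouping pass on a sorted list = filter by count 1
theorem pvRuns_eq_filter : ∀ (s : List Int), List.Pairwise (· ≤ ·) s →
    pvRuns s = s.filter (fun y => (s.count y) == 1) := by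
  intro s
  induction s using pvRuns.induct with
  | case1 => intro _; simp [pvRuns]
  | case2 x xs htake ih =>
    intro hs
    have hxs : List.Pairwise (· ≤ ·) xs := (List.pairwise_cons.mp hs).2
    have hx : ∀ y ∈ xs, x ≤ y := (List.pairwise_cons.mp hs).1
    have hdrop : xs.dropWhile (fun y => y == x) = xs := by
      conv_rhs => rw [← List.takeWhile_append_dropWhile (p := fun y => y == x) (l := xs)]
      rw [htake]; simp
    have hxr : x ∉ xs := by
      have := pvNot_mem_dropWhile x xs hxs hx; rwa [hdrop] at this
    have hcx : (x :: xs).count x = 1 := by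
      simp [List.count_eq_zero.mpr hxr]
    have hcy : ∀ y ∈ xs, (x :: xs).count y = xs.count y := by
      intro y hy
      have hne : y ≠ x := fun h => hxr (h ▸ hy)
      simp [Ne.symm hne]
    rw [pvRuns, if_pos htake, hdrop]
    rw [List.filter_cons]
    simp only [hcx]
    rw [List.filter_congr (fun y hy => by rw [hcy y hy])]
    rw [hdrop] at ih
    rw [ih hxs]
    simp
  | case3 x xs htake ih =>
    intro hs
    have hxs : List.Pairwise (· ≤ ·) xs := (List.pairwise_cons.mp hs).2
    have hx : ∀ y ∈ xs, x ≤ y := (List.pairwise_cons.mp hs).1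
    have hxr : x ∉ xs.dropWhile (fun y => y == x) := pvNot_mem_dropWhile x xs hxs hx
    have hrs : List.Pairwise (· ≤ ·) (xs.dropWhile (fun y => y == x)) :=
      hxs.sublist (List.dropWhile_sublist _)
    have ht : ∀ y ∈ xs.takeWhile (fun y => y == x), y = x := by
      intro y hy
      have := List.mem_takeWhile_imp hy; simpa using this
    have hsplit : xs = xs.takeWhile (fun y => y == x) ++ xs.dropWhile (fun y => y == x) :=
      (List.takeWhile_append_dropWhile).symm
    have hct : (xs.takeWhile (fun y => y == x)).count x = (xs.takeWhile (fun y => y == x)).length :=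
      List.count_eq_length.mpr (fun b hb => (ht b hb).symm)
    have hcx : (x :: xs).count x = (xs.takeWhile (fun y => y == x)).length + 1 := by
      rw [List.count_cons]
      conv_lhs => rw [hsplit]
      rw [List.count_append, hct, List.count_eq_zero.mpr hxr]
      simp
    have hlen : (xs.takeWhile (fun y => y == x)).length ≠ 0 := by
      simpa [List.length_eq_zero_iff] using htake
    have hcy : ∀ y ∈ xs.dropWhile (fun y => y == x),
        (x :: xs).count y = (xs.dropWhile (fun y => y == x)).count y := by
      intro y hy
      have hne : y ≠ x := fun h => hxr (h ▸ hy)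
      have hnt : y ∉ xs.takeWhile (fun y => y == x) := fun h => hne (ht y h)
      rw [List.count_cons]
      conv_lhs => rw [hsplit]
      rw [List.count_append, List.count_eq_zero.mpr hnt]
      simp [Ne.symm hne]
    rw [pvRuns, if_neg htake]
    rw [List.filter_cons]
    have hpx : (((x :: xs).count x) == 1) = false := by
      rw [hcx]
      simp only [beq_eq_false_iff_ne, ne_eq]
      omega
    rw [hpx]
    simp only [Bool.false_eq_true, if_false]
    have hfsplit : List.filter (fun y => List.count y (x :: xs) == 1) xs
        = List.filter (fun y => List.count y (x :: xs) == 1)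
            (List.takeWhile (fun y => y == x) xs ++ List.dropWhile (fun y => y == x) xs) := by
      congr 1
    rw [hfsplit, List.filter_append]
    have hft : (xs.takeWhile (fun y => y == x)).filter (fun y => ((x :: xs).count y) == 1) = [] := by
      rw [List.filter_eq_nil_iff]
      intro y hy
      rw [ht y hy, hpx]; simp
    rw [hft, List.nil_append]
    rw [List.filter_congr (fun y hy => by rw [hcy y hy])]
    exact ih hrs

-- Nodup of the count-1 filter
theorem pvNodup_filter (s : List Int) :
    (s.filter (fun y => (s.count y) == 1)).Nodup := by
  rw [List.nodup_iff_count_le_one]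
  intro a
  by_cases h : ((s.count a) == 1) = true
  · rw [List.count_filter (p := fun y => List.count y s == 1) (a := a) (l := s) h]
    have h1 : List.count a s = 1 := by simpa using h
    omega
  · rw [List.count_eq_zero.mpr]
    · omega
    · intro hmem
      exact h (List.mem_filter.mp hmem).2

theorem find_unique_elements_spec : Claim_equal_find_unique_elements := by
  intro nums _
  unfold Spec_find_unique_elements
  simp only [find_unique_elements, find_unique_elements_alt]
  rw [pvFold_eq_counter, pvUnique_eq]
  set s := PySem.List.sorted nums (fun x => x) with hsdef
  have hpair : List.Pairwise (· ≤ ·) s := by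
    simpa using PySem.List.sorted_pairwise nums (fun x => x)
  have hperm : s.Perm nums := PySem.List.sorted_perm nums (fun x => x) false
  rw [pvRuns_eq_filter s hpair]
  set u := (PySem.Set.ofList nums).filter (fun k => ((nums.count k : Int)) == 1) with hudef
  set F := s.filter (fun y => (s.count y) == 1) with hFdef
  have hnodupF : F.Nodup := pvNodup_filter s
  have hnodupu : u.Nodup := (PySem.Set.nodup_ofList nums).filter _
  have hpermuF : F.Perm u := by
    rw [List.perm_ext_iff_of_nodup hnodupF hnodupu]
    intro a
    rw [hudef, hFdef]
    simp only [List.mem_filter, PySem.Set.mem_ofList]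
    constructor
    · rintro ⟨ha, hc⟩
      refine ⟨hperm.mem_iff.mp ha, ?_⟩
      rw [← hperm.count_eq]
      simpa using hc
    · rintro ⟨ha, hc⟩
      refine ⟨hperm.mem_iff.mpr ha, ?_⟩
      rw [hperm.count_eq]
      simpa using hc
  have hlt : List.Pairwise (· < ·) F :=
    ((hpair.sublist List.filter_sublist).and hnodupF).imp
      (fun h => lt_of_le_of_ne h.1 h.2)
  have hsorted : PySem.List.sorted u (fun x => x) = F :=
    PySem.List.sorted_eq_of_perm_of_pairwise_lt u F (fun x => x) hpermuF hlt
  by_cases hu : u = []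
  · have hF : F = [] := by
      rw [hu] at hpermuF
      exact hpermuF.eq_nil
    rw [if_pos hu, if_pos hF]
  · have hF : F ≠ [] := fun h => hu ((h ▸ hpermuF).symm.eq_nil)
    rw [if_neg hu, if_neg hF, hsorted]
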